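-- pv_equiv track=rewrite | github.com/LeMon0526/CODE | CA.py | OneDEncrypt
-- ===== SOURCE A (Python) =====
-- def OneDEncrypt(plaintext, key):
--     ciphertext = ['\0',]*6400
--     tempPlaintext = ['\0',]*6400
--     tempCiphertext = ['\0',]*6400
--
--     #处理原始明文字符串
--     num = 0;    #有效明文字数
--     for i in range(0,len(plaintext)):
--         if(97<=ord(plaintext[i])<=122):  #原始明文为小写字母
--             tempPlaintext[num] = plaintext[i]
--             num += 1
--         elif(65<=ord(plaintext[i])<=90): #原始明文为大写字母
--             tempPlaintext[num] = chr(ord(plaintext[i])+32)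
--             num += 1
--
--     #原始明文字母转换为0/1流
--     plaintextStream = ""
--     for i in range(0,num):
--         tempStream = str(bin(ord(tempPlaintext[i])))
--         tempStream = tempStream[2:]
--         plaintextStream = plaintextStream + tempStream
--
--     #加密规则
--     key = int(key)
--     ruleStr = str(bin(key))
--     ruleStr = "0"*(10-len(ruleStr))+ruleStr[2:]
--
--     #根据规则加密
--     ciphertextStream = RuleEncrypt(ruleStr, plaintextStream)
--     for i in range(0,int(len(ciphertextStream)/7)):
--         tempC = ciphertextStream[i*7:(i+1)*7]
--         tempC = ''.join(tempC)
--         tempCiphertext[i] = chr(int(tempC,2))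
--
--     #转换密文字符串
--     num = 0
--     for i in range(0,len(plaintext)):
--         if(97<=ord(plaintext[i])<=122):
--             ciphertext[i] = tempCiphertext[num]
--             num += 1
--         elif(65<=ord(plaintext[i])<=90):
--             ciphertext[i] = chr(ord(tempCiphertext[num])-32)
--             num += 1
--         else:
--             ciphertext[i] = plaintext[i]
--     ciphertext = ciphertext[:len(plaintext)]
--     ciphertext = ''.join(ciphertext)
--     return ciphertext
--
-- def RuleEncrypt(ruleStr, plaintextStream):
--     ciphertextStream = ['\0',]*len(plaintextStream)
--     for i in range(0,len(plaintextStream)):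
--         tempStream = plaintextStream[i-1] + plaintextStream[i] + plaintextStream[(i+1)%len(plaintextStream)]
--         ciphertextStream[i] = ruleStr[int(tempStream,2)]
--     return ciphertextStream
-- ===== SOURCE B (Python) =====
-- def OneDEncrypt(plaintext, key):
--     # Per-letter encryption: every lowercase code is in [96,127], so its first two
--     # stream bits are 1,1 and each 7-bit block's CA output depends only on the
--     # previous letter's parity bit and the letter itself (the bit after the block
--     # is the next letter's leading 1).  So each letter is encrypted independently,
--     # with no global bitstream or CA pass.
--     key = int(key)
--     ruleStr = "0" * (10 - len(bin(key))) + bin(key)[2:]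
--
--     def enc_letter(p, c):
--         window = [p] + [(c >> k) & 1 for k in range(6, -1, -1)] + [1]
--         v = 0
--         for k in range(7):
--             v = 2 * v + (ruleStr[4 * window[k] + 2 * window[k + 1] + window[k + 2]] == '1')
--         return v
--
--     letters = [o + 32 if o <= 90 else o for o in map(ord, plaintext)
--                if 65 <= o <= 90 or 97 <= o <= 122]
--     out = []
--     j = 0
--     for ch in plaintext:
--         o = ord(ch)
--         if 65 <= o <= 90 or 97 <= o <= 122:
--             v = enc_letter(letters[j - 1] & 1, letters[j])
--             out.append(chr(v - 32) if o <= 90 else chr(v))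
--             j += 1
--         else:
--             out.append(ch)
--     return ''.join(out)
-- ===== Notes on version B (the rewrite author's own statement) =====
-- stated objective: alternative
-- what changed: Every lowercase code lies in [96,127], so each 7-bit block starts with two 1-bits and the CA neighborhood crosses block borders only through the previous letter's parity bit; B therefore encrypts each letter independently from (previous letter's low bit, letter) via a local 9-bit window — no global bitstream, no RuleEncrypt pass over it, no 7-bit chunk slicing and no fixed 6400-slot buffers.
import Mathlib
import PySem

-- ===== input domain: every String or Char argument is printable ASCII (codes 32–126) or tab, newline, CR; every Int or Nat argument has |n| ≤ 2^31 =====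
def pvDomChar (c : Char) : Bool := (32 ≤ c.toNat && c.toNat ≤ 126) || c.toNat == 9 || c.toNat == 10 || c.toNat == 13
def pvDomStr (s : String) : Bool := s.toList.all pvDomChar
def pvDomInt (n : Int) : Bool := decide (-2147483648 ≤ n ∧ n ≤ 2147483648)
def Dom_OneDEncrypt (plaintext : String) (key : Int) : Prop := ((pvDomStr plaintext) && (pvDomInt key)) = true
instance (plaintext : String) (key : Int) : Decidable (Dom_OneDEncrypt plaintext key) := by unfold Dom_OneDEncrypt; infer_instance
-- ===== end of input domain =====

-- B encrypts each letter independently (every lowercase code starts with two 1-bits,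
-- so the CA neighborhood crosses block borders only through the previous letter's
-- parity bit): no global bitstream, no CA pass, no chunk slicing (objective: alternative).
-- The equivalence is about the return value; neither program mutates its arguments.

-- ===== PORT A =====
-- big-endian binary digits; fuel n+1 always suffices (each step halves n), so this
-- computes exactly the digit part of Python's bin(n)
def pvBinDigitsAuxA : Nat → Nat → List Char
  | 0, n => [if n = 1 then '1' else '0']
  | fuel + 1, n =>
    if n < 2 then [if n = 1 then '1' else '0']
    else pvBinDigitsAuxA fuel (n / 2) ++ [if n % 2 = 1 then '1' else '0']

def pvBinDigitsA (n : Nat) : List Char := pvBinDigitsAuxA n n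

-- Python bin(k) as a list of chars ("0b…", "-0b…")
def pvBinA (k : Int) : List Char :=
  if k < 0 then '-' :: '0' :: 'b' :: pvBinDigitsA (-k).toNat
  else '0' :: 'b' :: pvBinDigitsA k.toNat

-- chr(n); exact for 0 ≤ n < 0xD800 — Pre_ keeps every chr argument of A in range
def pvChrA (n : Int) : Char := Char.ofNat n.toNat

-- int(s, 2); exact when s is a nonempty string of '0'/'1' (true under Pre_)
def pvInt2A (s : List Char) : Int :=
  s.foldl (fun a c => 2 * a + (if c = '1' then 1 else 0)) 0

-- RuleEncrypt: position i reads neighbors i-1 (Python wraparound) and (i+1) % len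
def RuleEncryptA (ruleStr : List Char) (stream : List Char) : List Char :=
  (List.range stream.length).map (fun (i : Nat) =>
    let temp : List Char :=
      [PySem.List.pyGetD stream ((i : Int) - 1) '\x00',
       PySem.List.pyGetD stream (i : Int) '\x00',
       PySem.List.pyGetD stream (PySem.Int.mod ((i : Int) + 1) (stream.length : Int)) '\x00']
    PySem.List.pyGetD ruleStr (pvInt2A temp) '\x00')

-- The '\0'-padded 6400 buffers are modeled as grow-lists whose out-of-range reads
-- default to '\x00' (exactly the padding A reads); the final [:len(plaintext)]
-- truncation is then the identity.  Faithful for plaintext.length ≤ 6400 (Pre_).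
def OneDEncrypt (plaintext : String) (key : Int) : String :=
  let cs := plaintext.toList
  let tempPlaintext := cs.foldl (fun (acc : List Char) c =>
      if 97 ≤ c.toNat ∧ c.toNat ≤ 122 then acc ++ [c]
      else if 65 ≤ c.toNat ∧ c.toNat ≤ 90 then acc ++ [pvChrA ((c.toNat : Int) + 32)]
      else acc) []
  let plaintextStream := tempPlaintext.foldl (fun (s : List Char) c =>
      s ++ (pvBinA (c.toNat : Int)).drop 2) []
  let ruleStr := List.replicate (10 - (pvBinA key).length) '0' ++ (pvBinA key).drop 2
  let ciphertextStream := RuleEncryptA ruleStr plaintextStream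
  let tempCiphertext := (List.range (ciphertextStream.length / 7)).map (fun (i : Nat) =>
      pvChrA (pvInt2A (PySem.List.slice ciphertextStream
        (some ((i : Int) * 7)) (some (((i : Int) + 1) * 7)))))
  let out := cs.foldl (fun (acc : List Char × Nat) c =>
      if 97 ≤ c.toNat ∧ c.toNat ≤ 122 then
        (acc.1 ++ [tempCiphertext.getD acc.2 '\x00'], acc.2 + 1)
      else if 65 ≤ c.toNat ∧ c.toNat ≤ 90 then
        (acc.1 ++ [pvChrA (((tempCiphertext.getD acc.2 '\x00').toNat : Int) - 32)], acc.2 + 1)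
      else (acc.1 ++ [c], acc.2)) ([], 0)
  String.ofList out.1

-- ===== PORT B =====
-- same fuel scheme as A's bin helper
def pvBinDigitsAuxB : Nat → Nat → List Char
  | 0, n => [if n = 1 then '1' else '0']
  | fuel + 1, n =>
    if n < 2 then [if n = 1 then '1' else '0']
    else pvBinDigitsAuxB fuel (n / 2) ++ [if n % 2 = 1 then '1' else '0']

def pvBinDigitsB (n : Nat) : List Char := pvBinDigitsAuxB n n

-- Python bin(k)
def pvBinB (k : Int) : List Char :=
  if k < 0 then '-' :: '0' :: 'b' :: pvBinDigitsB (-k).toNat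
  else '0' :: 'b' :: pvBinDigitsB k.toNat

-- chr(n); exact for 0 ≤ n < 0xD800 — Pre_ keeps every chr argument of B in range
def pvChrB (n : Int) : Char := Char.ofNat n.toNat

-- enc_letter(p, c): window = [p] + 7 bits of c + [1]; 7 rule lookups folded to a value
def encLetterB (rule : List Char) (p c : Nat) : Nat :=
  let window : List Nat :=
    p :: ((PySem.List.pyRange 6 (-1) (-1)).map (fun k => (c >>> k.toNat) &&& 1)) ++ [1]
  (List.range 7).foldl (fun (v : Nat) (k : Nat) =>
    2 * v + (if PySem.List.pyGetD rule
        ((4 * PySem.List.pyGetD window (k : Int) 0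
          + 2 * PySem.List.pyGetD window ((k : Int) + 1) 0
          + PySem.List.pyGetD window ((k : Int) + 2) 0 : Nat) : Int) '\x00' = '1'
      then 1 else 0)) 0

def OneDEncrypt_alt (plaintext : String) (key : Int) : String :=
  let ruleStr := List.replicate (10 - (pvBinB key).length) '0' ++ (pvBinB key).drop 2
  let letters := plaintext.toList.filterMap (fun ch =>
      if (65 ≤ ch.toNat ∧ ch.toNat ≤ 90) ∨ (97 ≤ ch.toNat ∧ ch.toNat ≤ 122) then
        some (if ch.toNat ≤ 90 then ch.toNat + 32 else ch.toNat) else none)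
  let out := plaintext.toList.foldl (fun (acc : List Char × Nat) ch =>
      if (65 ≤ ch.toNat ∧ ch.toNat ≤ 90) ∨ (97 ≤ ch.toNat ∧ ch.toNat ≤ 122) then
        let v := encLetterB ruleStr
          ((PySem.List.pyGetD letters ((acc.2 : Int) - 1) 0) &&& 1)
          (PySem.List.pyGetD letters (acc.2 : Int) 0)
        (acc.1 ++ [if ch.toNat ≤ 90 then pvChrB ((v : Int) - 32) else pvChrB (v : Int)],
         acc.2 + 1)
      else (acc.1 ++ [ch], acc.2)) ([], 0)
  String.ofList out.1

-- ===== PRECONDITION & SPEC =====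
-- helpers for Pre_ only: bin(|key|)'s digit count, whether rule-string slot t is '1'
-- (A pads bin(key)[2:] to 8 chars; for key < 0 the slice starts with 'b'), the index
-- of that stray 'b', the lowered letter codes with case flags, and the 3-bit
-- neighborhood pattern that letter j's chunk position k selects in the rule string
def pvDlen (m : Nat) : Nat := if m = 0 then 1 else m.log2 + 1

def pvRuleIsOne (key : Int) (t : Nat) : Bool :=
  if 0 ≤ key then key.toNat.testBit (max 8 (pvDlen key.toNat) - 1 - t)
  else
    let m := (-key).toNat
    let d := pvDlen m
    let ib := if d ≤ 7 then 7 - d else 0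
    if t ≤ ib then false else m.testBit (d - 1 - (t - ib - 1))

def pvBSlot (key : Int) : Nat :=
  if pvDlen (-key).toNat ≤ 7 then 7 - pvDlen (-key).toNat else 0

-- lowered code and was-uppercase flag of each letter, in order
def pvLetterInfo (cs : List Char) : List (Nat × Bool) :=
  cs.filterMap (fun c =>
    if 97 ≤ c.toNat ∧ c.toNat ≤ 122 then some (c.toNat, false)
    else if 65 ≤ c.toNat ∧ c.toNat ≤ 90 then some (c.toNat + 32, true) else none)

def pvCodes (cs : List Char) : List Nat := (pvLetterInfo cs).map Prod.fst

def pvIdxAt (codes : List Nat) (j k : Nat) : Nat :=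
  let cj := codes.getD j 0
  let left := if k = 0 then (codes.getD ((j + codes.length - 1) % codes.length) 0) % 2
              else (cj >>> (7 - k)) &&& 1
  let right := if k = 6 then 1 else (cj >>> (5 - k)) &&& 1
  4 * left + 2 * ((cj >>> (6 - k)) &&& 1) + right

-- Pre_ is exactly the set of inputs on which A returns (checked against A on both
-- key signs): it excludes plaintexts longer than A's fixed 6400-slot buffers
-- (IndexError); inputs whose letters select the 'b' that bin() of a negative key
-- leaves in the rule string, except as the '0b' literal prefix of a lowercase
-- chunk, which int(·,2) accepts (else ValueError); and inputs where some encrypted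
-- uppercase letter's value is < 32, so A's chr(value-32) raises ValueError — each
-- letter's two leading output bits are the rule slots selected by its patterns 0
-- and 1, which depend only on the letter and its cyclic predecessor's parity.
def Pre_OneDEncrypt (plaintext : String) (key : Int) : Prop :=
  plaintext.length ≤ 6400 ∧
  (key < 0 → ((List.range (pvCodes plaintext.toList).length).all (fun j =>
    (List.range 7).all (fun k =>
      pvIdxAt (pvCodes plaintext.toList) j k != pvBSlot key ||
      (k == 1 && pvIdxAt (pvCodes plaintext.toList) j 0 != pvBSlot key &&
       !pvRuleIsOne key (pvIdxAt (pvCodes plaintext.toList) j 0) &&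
       !((pvLetterInfo plaintext.toList).getD j (0, false)).2)))) = true) ∧
  ((List.range (pvLetterInfo plaintext.toList).length).all (fun j =>
    !((pvLetterInfo plaintext.toList).getD j (0, false)).2 ||
    (pvRuleIsOne key (pvIdxAt (pvCodes plaintext.toList) j 0) ||
     pvRuleIsOne key (pvIdxAt (pvCodes plaintext.toList) j 1)))) = true

instance (plaintext : String) (key : Int) : Decidable (Pre_OneDEncrypt plaintext key) := by
  unfold Pre_OneDEncrypt; infer_instance

def pvWitness_OneDEncrypt : String × Int := ("Ab c!", 255)

def Spec_OneDEncrypt (plaintext : String) (key : Int) (out : String) : Prop := out = OneDEncrypt_alt plaintext key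
instance (plaintext : String) (key : Int) (out : String) : Decidable (Spec_OneDEncrypt plaintext key out) := by unfold Spec_OneDEncrypt; infer_instance

-- ===== CLAIM (what is proved, stated in full; the proofs are below) =====
def Claim_equal_OneDEncrypt : Prop := ∀ (plaintext : String) (key : Int), Dom_OneDEncrypt plaintext key → Pre_OneDEncrypt plaintext key → Spec_OneDEncrypt plaintext key (OneDEncrypt plaintext key)

-- ===== LEMMAS AND PROOFS =====


-- the two bin-digit helpers compute the same digits
theorem pvBinDigitsAuxB_eq (fuel n : Nat) : pvBinDigitsAuxB fuel n = pvBinDigitsAuxA fuel n := by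
  induction fuel generalizing n with
  | zero => rfl
  | succ fuel ih => rw [pvBinDigitsAuxA, pvBinDigitsAuxB]; rw [ih]

-- Python bin() computed by both sides is the same char list
theorem pvBin_eq (k : Int) : pvBinB k = pvBinA k := by
  unfold pvBinB pvBinA pvBinDigitsB pvBinDigitsA
  rw [pvBinDigitsAuxB_eq, pvBinDigitsAuxB_eq]

-- '0'/'1' character for a bit
def pvBitChar (b : Nat) : Char := if b = 1 then '1' else '0'

-- the 7-bit big-endian bit list of a letter code (shape of B's window core)
def pvBits7B (o : Nat) : List Nat :=
  (PySem.List.pyRange 6 (-1) (-1)).map (fun k => (o >>> k.toNat) &&& 1)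

-- bin digits of a lowercase letter code are exactly its 7 bits
theorem binDigits_eq_bits7 : ∀ n < 123, 97 ≤ n →
    pvBinDigitsA n = (pvBits7B n).map pvBitChar := by
  decide

-- every emitted bit is 0 or 1
theorem bits7_le_one (o : Nat) : ∀ b ∈ pvBits7B o, b ≤ 1 := by
  intro b hb
  simp only [pvBits7B, List.mem_map] at hb
  obtain ⟨k, -, rfl⟩ := hb
  exact Nat.and_le_right

theorem length_bits7 (o : Nat) : (pvBits7B o).length = 7 := by
  simp only [pvBits7B, List.length_map]
  decide

theorem bits7_explicit (o : Nat) :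
    pvBits7B o = [(o >>> 6) &&& 1, (o >>> 5) &&& 1, (o >>> 4) &&& 1, (o >>> 3) &&& 1,
                  (o >>> 2) &&& 1, (o >>> 1) &&& 1, (o >>> 0) &&& 1] := by
  have h : PySem.List.pyRange 6 (-1) (-1) = [6, 5, 4, 3, 2, 1, 0] := by decide
  unfold pvBits7B
  rw [h]
  rfl

-- the bin-digit helpers produce nonempty lists of '0'/'1' characters
-- A's letter extraction
def pvLettersA (cs : List Char) : List Char :=
  cs.foldl (fun (acc : List Char) c =>
      if 97 ≤ c.toNat ∧ c.toNat ≤ 122 then acc ++ [c]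
      else if 65 ≤ c.toNat ∧ c.toNat ≤ 90 then acc ++ [pvChrA ((c.toNat : Int) + 32)]
      else acc) []

theorem pvChrA_toNat (n : Int) (h0 : 0 ≤ n) (h1 : n < 55296) :
    (pvChrA n).toNat = n.toNat := by
  unfold pvChrA Char.ofNat Char.toNat
  rw [dif_pos (Or.inl (by omega))]
  rfl

theorem lettersA_range (cs : List Char) :
    ∀ c ∈ pvLettersA cs, 97 ≤ c.toNat ∧ c.toNat ≤ 122 := by
  suffices h : ∀ (acc : List Char), (∀ c ∈ acc, 97 ≤ c.toNat ∧ c.toNat ≤ 122) →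
      ∀ c ∈ cs.foldl (fun (acc : List Char) c =>
        if 97 ≤ c.toNat ∧ c.toNat ≤ 122 then acc ++ [c]
        else if 65 ≤ c.toNat ∧ c.toNat ≤ 90 then acc ++ [pvChrA ((c.toNat : Int) + 32)]
        else acc) acc, 97 ≤ c.toNat ∧ c.toNat ≤ 122 by
    exact h [] (by simp)
  induction cs with
  | nil => intro acc hacc; simpa using hacc
  | cons c cs ih =>
    intro acc hacc
    simp only [List.foldl_cons]
    split_ifs with h1 h2
    · refine ih _ ?_
      intro x hx
      rcases List.mem_append.1 hx with hx | hx
      · exact hacc x hx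
      · simp only [List.mem_singleton] at hx; subst hx; exact h1
    · refine ih _ ?_
      intro x hx
      rcases List.mem_append.1 hx with hx | hx
      · exact hacc x hx
      · simp only [List.mem_singleton] at hx; subst hx
        have ht : (pvChrA ((c.toNat : Int) + 32)).toNat = ((c.toNat : Int) + 32).toNat :=
          pvChrA_toNat _ (by omega) (by omega)
        omega
    · exact ih _ hacc

-- A's character stream is the letters' bit stream rendered as characters
theorem streamA_eq (cs : List Char) :
    (pvLettersA cs).foldl (fun (s : List Char) c => s ++ (pvBinA (c.toNat : Int)).drop 2) []
    = ((pvLettersA cs).flatMap (fun c => pvBits7B c.toNat)).map pvBitChar := by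
  rw [PySem.List.foldl_append_eq_flatMap, List.nil_append, List.map_flatMap]
  rw [List.flatMap_def, List.flatMap_def]
  congr 1
  apply List.map_congr_left
  intro c hc
  have h := lettersA_range cs c hc
  unfold pvBinA
  rw [if_neg (by omega)]
  have h2 := binDigits_eq_bits7 c.toNat (by omega) (by omega)
  simp only [Int.toNat_natCast, List.drop_succ_cons, List.drop_zero]
  exact h2

-- the arithmetic form of the CA pass (proof-side bridge)
def pvEncB (rule : List Char) (bits : List Nat) : List Nat :=
  (List.range bits.length).map (fun (i : Nat) =>
    let idx : Int := 4 * (PySem.List.pyGetD bits ((i : Int) - 1) 0 : Nat)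
                   + 2 * (PySem.List.pyGetD bits (i : Int) 0 : Nat)
                   + (PySem.List.pyGetD bits (PySem.Int.mod ((i : Int) + 1) (bits.length : Int)) 0 : Nat)
    if PySem.List.pyGetD rule idx '\x00' = '1' then 1 else 0)

-- the CA pass: the arithmetic bit list is A's char list read back as bits
theorem encB_eq (rule : List Char) (bits : List Nat) (hb : ∀ b ∈ bits, b ≤ 1) :
    pvEncB rule bits
    = (RuleEncryptA rule (bits.map pvBitChar)).map (fun c => if c = '1' then 1 else 0) := by
  unfold pvEncB RuleEncryptA
  rw [List.map_map, List.length_map]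
  apply List.map_congr_left
  intro i hi
  have hin : i < bits.length := List.mem_range.mp hi
  have hn : 0 < bits.length := by omega
  have hread : ∀ (j : Int), -(bits.length : Int) ≤ j → j < (bits.length : Int) →
      PySem.List.pyGetD (bits.map pvBitChar) j '\x00' = pvBitChar (PySem.List.pyGetD bits j 0) := by
    intro j hj0 hj1
    rcases (by omega : 0 ≤ j ∨ j < 0) with hj | hj
    · rw [PySem.List.pyGetD_eq_getElem _ _ hj (by simpa using hj1),
          PySem.List.pyGetD_eq_getElem _ _ hj hj1, List.getElem_map]
    · have hk0 : 0 < (-j).toNat := by omega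
      have hkl : (-j).toNat ≤ (bits.map pvBitChar).length := by simp; omega
      have hj' : j = -(((-j).toNat : Nat) : Int) := by omega
      rw [hj', PySem.List.pyGetD_neg_natCast _ _ '\x00' hk0 hkl,
          PySem.List.pyGetD_neg_natCast _ _ 0 hk0 (by simpa using hkl)]
      simp
  have hmod0 : 0 ≤ PySem.Int.mod ((i : Int) + 1) ((bits.length : Int)) :=
    Int.fmod_nonneg (by omega) (by omega)
  have hmod1 : PySem.Int.mod ((i : Int) + 1) ((bits.length : Int)) < (bits.length : Int) :=
    Int.fmod_lt_of_pos _ (by omega)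
  show (if PySem.List.pyGetD rule
      (4 * ((PySem.List.pyGetD bits ((i : Int) - 1) 0 : Nat) : Int)
        + 2 * ((PySem.List.pyGetD bits ((i : Int)) 0 : Nat) : Int)
        + ((PySem.List.pyGetD bits (PySem.Int.mod ((i : Int) + 1) ((bits.length : Nat) : Int)) 0 : Nat) : Int)) '\x00' = '1'
      then 1 else 0)
    = (fun c => if c = '1' then 1 else 0)
        (PySem.List.pyGetD rule (pvInt2A
          [PySem.List.pyGetD (bits.map pvBitChar) ((i : Int) - 1) '\x00',
           PySem.List.pyGetD (bits.map pvBitChar) ((i : Int)) '\x00',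
           PySem.List.pyGetD (bits.map pvBitChar) (PySem.Int.mod ((i : Int) + 1) ((bits.length : Nat) : Int)) '\x00']) '\x00')
  rw [hread ((i : Int) - 1) (by omega) (by omega),
      hread (i : Int) (by omega) (by omega),
      hread _ (by omega) hmod1]
  have hbit : ∀ (j : Int), PySem.Raise.InRange bits.length j →
      PySem.List.pyGetD bits j 0 ≤ 1 := by
    intro j hj
    exact hb _ (PySem.List.pyGetD_mem _ _ hj)
  have h1 := hbit ((i : Int) - 1) ⟨by omega, by omega⟩
  have h2 := hbit (i : Int) ⟨by omega, by omega⟩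
  have h3 := hbit (PySem.Int.mod ((i : Int) + 1) ((bits.length : Int))) ⟨by omega, by omega⟩
  set p := PySem.List.pyGetD bits ((i : Int) - 1) 0 with hp
  set c := PySem.List.pyGetD bits ((i : Int)) 0 with hc
  set q := PySem.List.pyGetD bits (PySem.Int.mod ((i : Int) + 1) ((bits.length : Int))) 0 with hq
  have hidx : pvInt2A [pvBitChar p, pvBitChar c, pvBitChar q]
      = 4 * (p : Int) + 2 * (c : Int) + (q : Int) := by
    unfold pvInt2A pvBitChar
    simp only [List.foldl_cons, List.foldl_nil]
    interval_cases p <;> interval_cases c <;> interval_cases q <;> simp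
  rw [hidx]

-- bound for the 7-bit fold
theorem fold_bit_lt (l : List Nat) (hb : ∀ b ∈ l, b ≤ 1) (hl : l.length ≤ 7) :
    l.foldl (fun v b => 2 * v + b) 0 < 128 := by
  suffices h : ∀ (l : List Nat) (a : Nat), (∀ b ∈ l, b ≤ 1) →
      l.foldl (fun v b => 2 * v + b) a < (a + 1) * 2 ^ l.length by
    have := h l 0 hb
    have h2 : (2 : Nat) ^ l.length ≤ 2 ^ 7 := Nat.pow_le_pow_right (by omega) hl
    omega
  intro l
  induction l with
  | nil => intro a _; simp
  | cons b l ih =>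
    intro a hble
    simp only [List.foldl_cons, List.length_cons]
    have hb1 : b ≤ 1 := hble b (by simp)
    have := ih (2 * a + b) (fun x hx => hble x (by simp [hx]))
    have hle : (2 * a + b + 1) * 2 ^ l.length ≤ (a + 1) * 2 ^ (l.length + 1) := by
      rw [Nat.pow_succ]
      have h2 : 2 * a + b + 1 ≤ 2 * (a + 1) := by omega
      calc (2 * a + b + 1) * 2 ^ l.length ≤ (2 * (a + 1)) * 2 ^ l.length :=
            Nat.mul_le_mul_right _ h2
        _ = (a + 1) * 2 ^ (l.length + 1) := by ring
    omega

-- the Int parse of a char chunk equals the Nat fold of its bits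
theorem int2_eq_fold (s : List Char) :
    pvInt2A s = ((s.map (fun c => if c = '1' then 1 else 0)).foldl
      (fun (v : Nat) b => 2 * v + b) 0 : Nat) := by
  suffices h : ∀ (a : Nat), s.foldl (fun x c => 2 * x + (if c = '1' then 1 else 0)) ((a : Nat) : Int)
      = (((s.map (fun c => if c = '1' then 1 else 0)).foldl (fun (v : Nat) b => 2 * v + b) a : Nat) : Int) by
    simpa using h 0
  induction s with
  | nil => intro a; rfl
  | cons c s ih =>
    intro a
    simp only [List.foldl_cons, List.map_cons]
    have hcast : 2 * ((a : Nat) : Int) + (if c = '1' then 1 else 0)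
        = (((2 * a + (if c = '1' then 1 else 0) : Nat) : Nat) : Int) := by
      split <;> push_cast <;> ring
    rw [hcast, ih]

theorem pvIteLeOne (P : Prop) [Decidable P] : (if P then (1 : Nat) else 0) ≤ 1 := by
  split <;> omega

-- every CA output bit is 0 or 1
-- range(0, 7*m, 7) is the scaled range
theorem pyRange7 (m : Nat) :
    PySem.List.pyRange 0 ((7 * m : Nat) : Int) 7 = (List.range m).map (fun k => ((7 * k : Nat) : Int)) := by
  rw [PySem.List.pyRange_of_pos _ _ (by omega)]
  rcases Nat.eq_zero_or_pos m with rfl | hm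
  · simp
  · rw [if_pos (by push_cast; omega)]
    have hc : ((((7 * m : Nat) : Int) - 0 + 7 - 1) / 7).toNat = m := by
      push_cast; omega
    rw [hc]
    apply List.map_congr_left
    intro k _
    push_cast; ring

-- A's chunk-to-char pass produces the per-chunk bit folds rendered with chr
theorem chunks_eq (ruleStr : List Char) (bits : List Nat) (hb : ∀ b ∈ bits, b ≤ 1)
    (m : Nat) (hlen : bits.length = 7 * m) :
    (List.range ((RuleEncryptA ruleStr (bits.map pvBitChar)).length / 7)).map
      (fun (i : Nat) => pvChrA (pvInt2A (PySem.List.slice (RuleEncryptA ruleStr (bits.map pvBitChar))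
        (some ((i : Int) * 7)) (some (((i : Int) + 1) * 7)))))
    = ((PySem.List.pyRange 0 ((bits.length : Nat) : Int) 7).map (fun i =>
        (PySem.List.slice (pvEncB ruleStr bits) (some i) (some (i + 7))).foldl
          (fun v b => 2 * v + b) 0)).map (fun v => pvChrA ((v : Nat) : Int)) := by
  rw [hlen, pyRange7 m, encB_eq ruleStr bits hb, List.map_map, List.map_map]
  have hlenA : (RuleEncryptA ruleStr (bits.map pvBitChar)).length = 7 * m := by
    simp only [RuleEncryptA, List.length_map, List.length_range]
    exact hlen
  rw [hlenA, Nat.mul_div_cancel_left m (by omega : 0 < 7)]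
  apply List.map_congr_left
  intro k _
  simp only [Function.comp_apply]
  have h7 : ((k : Int) * 7) = ((7 * k : Nat) : Int) := by push_cast; ring
  have h7p : (((k : Int)) + 1) * 7 = ((7 * k + 7 : Nat) : Int) := by push_cast; ring
  have h7pp : ((7 * k : Nat) : Int) + 7 = ((7 * k + 7 : Nat) : Int) := by push_cast; ring
  rw [h7, h7p, h7pp, PySem.List.slice_natCast, PySem.List.slice_natCast]
  rw [← List.map_drop, ← List.map_take, int2_eq_fold]



-- A's foldl letter extraction as a flatMap
theorem lettersA_flatMap (cs : List Char) :
    pvLettersA cs = cs.flatMap (fun c =>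
      if 97 ≤ c.toNat ∧ c.toNat ≤ 122 then [c]
      else if 65 ≤ c.toNat ∧ c.toNat ≤ 90 then [pvChrA ((c.toNat : Int) + 32)] else []) := by
  unfold pvLettersA
  have hf : (fun (acc : List Char) c =>
      if 97 ≤ c.toNat ∧ c.toNat ≤ 122 then acc ++ [c]
      else if 65 ≤ c.toNat ∧ c.toNat ≤ 90 then acc ++ [pvChrA ((c.toNat : Int) + 32)]
      else acc)
    = (fun (acc : List Char) c => acc ++
      (if 97 ≤ c.toNat ∧ c.toNat ≤ 122 then [c]
       else if 65 ≤ c.toNat ∧ c.toNat ≤ 90 then [pvChrA ((c.toNat : Int) + 32)] else [])) := by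
    funext acc c
    split_ifs <;> simp
  rw [hf, PySem.List.foldl_append_eq_flatMap, List.nil_append]

-- B's letters list is A's letters list read as codes
theorem lettersN_eq (cs : List Char) :
    cs.filterMap (fun ch =>
      if (65 ≤ ch.toNat ∧ ch.toNat ≤ 90) ∨ (97 ≤ ch.toNat ∧ ch.toNat ≤ 122) then
        some (if ch.toNat ≤ 90 then ch.toNat + 32 else ch.toNat) else none)
    = (pvLettersA cs).map Char.toNat := by
  rw [lettersA_flatMap]
  induction cs with
  | nil => rfl
  | cons c cs ih =>
    rw [List.filterMap_cons, List.flatMap_cons, List.map_append, ← ih]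
    by_cases h1 : 97 ≤ c.toNat ∧ c.toNat ≤ 122
    · rw [if_pos h1, if_pos (Or.inr h1), if_neg (by omega)]
      simp
    · by_cases h2 : 65 ≤ c.toNat ∧ c.toNat ≤ 90
      · rw [if_neg h1, if_pos h2, if_pos (Or.inl h2), if_pos (by omega)]
        have ht : (pvChrA ((c.toNat : Int) + 32)).toNat = c.toNat + 32 := by
          have := pvChrA_toNat ((c.toNat : Int) + 32) (by omega) (by omega)
          omega
        simp [ht]
      · rw [if_neg h1, if_neg h2, if_neg (by tauto)]
        simp

-- length of the concatenated bit stream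
theorem flatLen (codes : List Nat) : (codes.flatMap pvBits7B).length = 7 * codes.length := by
  induction codes with
  | nil => rfl
  | cons c cs ih =>
    rw [List.flatMap_cons, List.length_append, length_bits7, ih, List.length_cons]
    ring

-- reading the concatenated stream inside block a
theorem flat7_getD (codes : List Nat) (a b : Nat) (ha : a < codes.length) (hb : b < 7) :
    (codes.flatMap pvBits7B).getD (7 * a + b) 0 = ((codes.getD a 0) >>> (6 - b)) &&& 1 := by
  induction codes generalizing a with
  | nil => simp at ha
  | cons c cs ih =>
    rw [List.flatMap_cons]
    cases a with
    | zero =>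
      rw [List.getD_append _ _ _ _ (by rw [length_bits7]; omega)]
      simp only [Nat.mul_zero, Nat.zero_add, List.getD_cons_zero]
      rw [bits7_explicit]
      interval_cases b <;> rfl
    | succ a =>
      have h7 : 7 * (a + 1) + b = (pvBits7B c).length + (7 * a + b) := by
        rw [length_bits7]; ring
      rw [h7, List.getD_append_right _ _ _ _ (by omega), Nat.add_sub_cancel_left]
      simp only [List.getD_cons_succ]
      exact ih a (by simp only [List.length_cons] at ha; omega)


-- the virtual window bit: p, then the 7 bits of c, then the next block's leading 1
def pvW (p c t : Nat) : Nat := if t = 0 then p else if t ≤ 7 then (c >>> (7 - t)) &&& 1 else 1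

theorem window_read (p c t : Nat) (ht : t ≤ 8) :
    PySem.List.pyGetD (p :: pvBits7B c ++ [1]) ((t : Nat) : Int) 0 = pvW p c t := by
  rw [PySem.List.pyGetD_natCast, bits7_explicit]
  interval_cases t <;> rfl

-- enc_letter with its window reads resolved
theorem encLetterB_eval (rule : List Char) (p c : Nat) :
    encLetterB rule p c = (List.range 7).foldl (fun v k =>
      2 * v + (if PySem.List.pyGetD rule
          ((4 * pvW p c k + 2 * pvW p c (k + 1) + pvW p c (k + 2) : Nat) : Int) '\x00' = '1'
        then 1 else 0)) 0 := by
  unfold encLetterB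
  apply PySem.List.foldl_congr_mem
  intro v k hk
  have hk7 : k < 7 := List.mem_range.mp hk
  have h1 : ((k : Int) + 1) = (((k + 1 : Nat) : Nat) : Int) := by push_cast; ring
  have h2 : ((k : Int) + 2) = (((k + 2 : Nat) : Nat) : Int) := by push_cast; ring
  rw [show (List.map (fun k => c >>> k.toNat &&& 1) (PySem.List.pyRange 6 (-1) (-1))) = pvBits7B c from rfl]
  rw [h1, h2, window_read p c k (by omega), window_read p c (k + 1) (by omega),
      window_read p c (k + 2) (by omega)]


-- a nonnegative value below the modulus is its own Python remainder
theorem fmod_self_lt (x n : Int) (h0 : 0 ≤ x) (h1 : x < n) : PySem.Int.mod x n = x := by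
  show Int.fmod x n = x
  rw [Int.fmod_eq_emod]; simp [Int.emod_eq_of_lt h0 h1]; omega

-- every lowercase code has leading bit 1
theorem bit6_one (c : Nat) (h1 : 97 ≤ c) (h2 : c ≤ 122) : (c >>> 6) &&& 1 = 1 := by
  rw [Nat.shiftRight_eq_div_pow]
  have h : c / 2 ^ 6 = 1 := by omega
  rw [h]; rfl

-- membership of getD values
theorem getD_mem_of_lt {l : List Nat} {a : Nat} (h : a < l.length) : l.getD a 0 ∈ l := by
  rw [List.getD_eq_getElem l 0 h]
  exact List.getElem_mem h

-- CORE: the CA fold of block j of the concatenated stream is B's per-letter value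
theorem core (rule : List Char) (codes : List Nat)
    (hc : ∀ c ∈ codes, 97 ≤ c ∧ c ≤ 122) (j : Nat) (hj : j < codes.length) :
    (PySem.List.slice (pvEncB rule (codes.flatMap pvBits7B))
        (some ((7 * j : Nat) : Int)) (some ((7 * j + 7 : Nat) : Int))).foldl
      (fun v b => 2 * v + b) 0
    = encLetterB rule ((PySem.List.pyGetD codes ((j : Int) - 1) 0) &&& 1) (codes.getD j 0) := by
  have hL : 0 < codes.length := by omega
  have hn : (codes.flatMap pvBits7B).length = 7 * codes.length := flatLen codes
  set bits := codes.flatMap pvBits7B with hbits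
  set p := (PySem.List.pyGetD codes ((j : Int) - 1) 0) &&& 1 with hp
  set c := codes.getD j 0 with hcj
  -- the three stream reads at position 7j+k are the window bits
  have hcen : ∀ k : Nat, k ≤ 8 → 7 * j + k < 7 * codes.length →
      bits.getD (7 * j + k) 0 = pvW p c (k + 1) ∨ k = 8 := by
    intro k hk hlt
    rcases (by omega : k < 7 ∨ k = 7 ∨ k = 8) with hk7 | rfl | rfl
    · left
      rw [flat7_getD codes j k hj hk7]
      unfold pvW
      rw [if_neg (by omega), if_pos (by omega)]
      rw [show (7 : Nat) - (k + 1) = 6 - k from by omega]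
    · -- k = 7: this is the next block's leading bit (j + 1 < codes.length here)
      left
      have hj1 : j + 1 < codes.length := by omega
      have h7 : 7 * j + 7 = 7 * (j + 1) + 0 := by ring
      rw [h7, flat7_getD codes (j + 1) 0 hj1 (by omega)]
      unfold pvW
      rw [if_neg (by omega), if_neg (by omega)]
      have := hc _ (getD_mem_of_lt hj1)
      simpa using bit6_one _ this.1 this.2
    · right; rfl
  have goalEq : (PySem.List.slice (pvEncB rule bits)
        (some ((7 * j : Nat) : Int)) (some ((7 * j + 7 : Nat) : Int)))
      = (List.range 7).map (fun k =>
          if PySem.List.pyGetD rule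
            ((4 * pvW p c k + 2 * pvW p c (k + 1) + pvW p c (k + 2) : Nat) : Int) '\x00' = '1'
          then 1 else 0) := by
    rw [PySem.List.slice_natCast, show 7 * j + 7 - 7 * j = 7 from by omega]
    apply List.ext_getElem
    · simp only [List.length_take, List.length_drop, List.length_map, List.length_range, pvEncB]
      omega
    · intro k h1 h2
      simp only [List.getElem_take, List.getElem_drop, List.getElem_map, List.getElem_range]
      have hk7 : k < 7 := by simpa using h2
      have hik : 7 * j + k < bits.length := by
        simp only [pvEncB, List.length_take, List.length_drop, List.length_map,
          List.length_range] at h1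
        omega
      show (pvEncB rule bits)[7 * j + k]'(by simpa [pvEncB] using hik) = _
      unfold pvEncB
      rw [List.getElem_map, List.getElem_range]
      simp only []
      -- left, center, right reads
      have hcenter : PySem.List.pyGetD bits ((7 * j + k : Nat) : Int) 0 = pvW p c (k + 1) := by
        rw [PySem.List.pyGetD_natCast]
        rcases hcen k (by omega) (by omega) with h | h
        · exact h
        · omega
      have hleft : PySem.List.pyGetD bits (((7 * j + k : Nat) : Int) - 1) 0 = pvW p c k := by
        rcases (by omega : 1 ≤ k ∨ (k = 0 ∧ 1 ≤ j) ∨ (k = 0 ∧ j = 0)) with hk1 | ⟨rfl, hj1⟩ | ⟨rfl, rfl⟩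
        · rw [show ((7 * j + k : Nat) : Int) - 1 = ((7 * j + (k - 1) : Nat) : Int) from by push_cast; omega,
            PySem.List.pyGetD_natCast]
          have := hcen (k - 1) (by omega) (by omega)
          rcases this with h | h
          · rw [h]; congr 1; omega
          · omega
        · rw [show ((7 * j + 0 : Nat) : Int) - 1 = ((7 * (j - 1) + 6 : Nat) : Int) from by push_cast; omega,
            PySem.List.pyGetD_natCast, flat7_getD codes (j - 1) 6 (by omega) (by omega)]
          unfold pvW
          rw [if_pos rfl, hp]
          rw [show ((j : Int) - 1) = (((j - 1 : Nat) : Nat) : Int) from by omega,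
            PySem.List.pyGetD_natCast]
          simp
        · rw [show ((7 * 0 + 0 : Nat) : Int) - 1 = -((1 : Nat) : Int) from by norm_num,
            PySem.List.pyGetD_neg_natCast _ _ _ (by omega) (by omega)]
          have hlast : bits.length - 1 = 7 * (codes.length - 1) + 6 := by omega
          rw [show bits[bits.length - 1]'(by omega) = bits.getD (bits.length - 1) 0 from
              (List.getD_eq_getElem bits 0 (by omega)).symm,
            hlast, flat7_getD codes (codes.length - 1) 6 (by omega) (by omega)]
          unfold pvW
          rw [if_pos rfl, hp]
          rw [show ((0 : Nat) : Int) - 1 = -((1 : Nat) : Int) from by norm_num,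
            PySem.List.pyGetD_neg_natCast _ _ _ (by omega) (by omega)]
          rw [show codes[codes.length - 1]'(by omega) = codes.getD (codes.length - 1) 0 from
              (List.getD_eq_getElem codes 0 (by omega)).symm]
          simp
      have hright : PySem.List.pyGetD bits
          (PySem.Int.mod (((7 * j + k : Nat) : Int) + 1) (bits.length : Int)) 0 = pvW p c (k + 2) := by
        rcases (by omega : k ≤ 5 ∨ (k = 6 ∧ j + 1 < codes.length) ∨ (k = 6 ∧ j + 1 = codes.length))
          with hk5 | ⟨rfl, hj1⟩ | ⟨rfl, hj1⟩
        · rw [show (((7 * j + k : Nat) : Int) + 1) = ((7 * j + (k + 1) : Nat) : Int) from by push_cast; omega,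
            fmod_self_lt _ _ (by positivity) (by push_cast; omega), PySem.List.pyGetD_natCast]
          rcases hcen (k + 1) (by omega) (by omega) with h | h
          · rw [h]
          · omega
        · rw [show (((7 * j + 6 : Nat) : Int) + 1) = ((7 * j + 7 : Nat) : Int) from by push_cast; omega,
            fmod_self_lt _ _ (by positivity) (by push_cast; omega), PySem.List.pyGetD_natCast]
          rcases hcen 7 (by omega) (by omega) with h | h
          · rw [h]
          · omega
        · rw [show (((7 * j + 6 : Nat) : Int) + 1) = (bits.length : Int) from by push_cast; omega]
          rw [show PySem.Int.mod (bits.length : Int) (bits.length : Int) = ((0 : Nat) : Int) from by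
            show Int.fmod _ _ = _; simp]
          rw [PySem.List.pyGetD_natCast,
            show (0 : Nat) = 7 * 0 + 0 from rfl, flat7_getD codes 0 0 (by omega) (by omega)]
          unfold pvW
          rw [if_neg (by omega), if_neg (by omega)]
          have := hc _ (getD_mem_of_lt hL)
          simpa using bit6_one _ this.1 this.2
      rw [hcenter, hleft, hright]
      congr 2
  rw [goalEq, encLetterB_eval]
  rw [List.foldl_map]


-- B's per-letter value is a 7-bit quantity
theorem encLetterB_lt (rule : List Char) (p c : Nat) : encLetterB rule p c < 128 := by
  rw [encLetterB_eval, ← List.foldl_map]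
  apply fold_bit_lt
  · intro b hb
    simp only [List.mem_map] at hb
    obtain ⟨k, -, rfl⟩ := hb
    exact pvIteLeOne _
  · simp

-- the rebuild folds of A and B agree while the consumed prefix stays aligned
theorem rebuild_eq (rule : List Char) (letters vals : List Nat)
    (hlen : vals.length = letters.length)
    (hv128 : ∀ v ∈ vals, v < 128)
    (hval : ∀ j, j < letters.length → vals.getD j 0
      = encLetterB rule ((PySem.List.pyGetD letters ((j : Int) - 1) 0) &&& 1)
          (PySem.List.pyGetD letters (j : Int) 0)) :
    ∀ (cs : List Char) (out : List Char) (num : Nat),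
    letters.drop num = cs.filterMap (fun ch =>
      if (65 ≤ ch.toNat ∧ ch.toNat ≤ 90) ∨ (97 ≤ ch.toNat ∧ ch.toNat ≤ 122) then
        some (if ch.toNat ≤ 90 then ch.toNat + 32 else ch.toNat) else none) →
    (cs.foldl (fun (acc : List Char × Nat) c =>
      if 97 ≤ c.toNat ∧ c.toNat ≤ 122 then
        (acc.1 ++ [(vals.map (fun v => pvChrA ((v : Nat) : Int))).getD acc.2 '\x00'], acc.2 + 1)
      else if 65 ≤ c.toNat ∧ c.toNat ≤ 90 then
        (acc.1 ++ [pvChrA ((((vals.map (fun v => pvChrA ((v : Nat) : Int))).getD acc.2 '\x00').toNat : Int) - 32)], acc.2 + 1)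
      else (acc.1 ++ [c], acc.2)) (out, num)).1
    = (cs.foldl (fun (acc : List Char × Nat) ch =>
      if (65 ≤ ch.toNat ∧ ch.toNat ≤ 90) ∨ (97 ≤ ch.toNat ∧ ch.toNat ≤ 122) then
        let v := encLetterB rule
          ((PySem.List.pyGetD letters ((acc.2 : Int) - 1) 0) &&& 1)
          (PySem.List.pyGetD letters (acc.2 : Int) 0)
        (acc.1 ++ [if ch.toNat ≤ 90 then pvChrB ((v : Int) - 32) else pvChrB (v : Int)],
         acc.2 + 1)
      else (acc.1 ++ [ch], acc.2)) (out, num)).1 := by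
  intro cs
  induction cs with
  | nil => intro out num _; rfl
  | cons ch cs ih =>
    intro out num hdrop
    simp only [List.foldl_cons]
    by_cases hlet : (65 ≤ ch.toNat ∧ ch.toNat ≤ 90) ∨ (97 ≤ ch.toNat ∧ ch.toNat ≤ 122)
    · -- a letter: the counter is within range and reads the aligned code
      simp only [List.filterMap_cons, if_pos hlet] at hdrop
      have hnum : num < letters.length := by
        by_contra hge
        rw [List.drop_eq_nil_of_le (by omega)] at hdrop
        exact List.cons_ne_nil _ _ hdrop.symm
      have hget : letters.getD num 0 = (if ch.toNat ≤ 90 then ch.toNat + 32 else ch.toNat) := by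
        have h0 : (letters.drop num).getD 0 0 = letters.getD num 0 := by
          rw [List.getD_eq_getElem _ _ (by simpa using hnum),
              List.getD_eq_getElem _ _ (by omega)]
          simp
        rw [← h0, hdrop]
        rfl
      have hdrop' : letters.drop (num + 1) = cs.filterMap (fun ch =>
          if (65 ≤ ch.toNat ∧ ch.toNat ≤ 90) ∨ (97 ≤ ch.toNat ∧ ch.toNat ≤ 122) then
            some (if ch.toNat ≤ 90 then ch.toNat + 32 else ch.toNat) else none) := by
        have : letters.drop (num + 1) = (letters.drop num).drop 1 := by
          rw [List.drop_drop]
        rw [this, hdrop]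
        rfl
      have hvnum : vals.getD num 0 = encLetterB rule
          ((PySem.List.pyGetD letters ((num : Int) - 1) 0) &&& 1)
          (PySem.List.pyGetD letters (num : Int) 0) := hval num hnum
      have hv : vals.getD num 0 < 128 := hv128 _ (getD_mem_of_lt (by omega))
      have hmapget : (vals.map (fun v => pvChrA ((v : Nat) : Int))).getD num '\x00'
          = pvChrA ((vals.getD num 0 : Nat) : Int) := by
        rw [List.getD_eq_getElem _ _ (by simpa using (by omega : num < vals.length)),
            List.getElem_map]
        congr 1
        rw [List.getD_eq_getElem _ _ (by omega)]
      by_cases hlow : 97 ≤ ch.toNat ∧ ch.toNat ≤ 122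
      · have hup : ¬ (65 ≤ ch.toNat ∧ ch.toNat ≤ 90) := by omega
        rw [if_pos hlow, if_pos hlet]
        simp only [if_neg (by omega : ¬ ch.toNat ≤ 90)] at hget ⊢
        rw [hmapget, hvnum]
        have : pvChrA ((encLetterB rule ((PySem.List.pyGetD letters ((num : Int) - 1) 0) &&& 1)
            (PySem.List.pyGetD letters (num : Int) 0) : Nat) : Int)
            = pvChrB ((encLetterB rule ((PySem.List.pyGetD letters ((num : Int) - 1) 0) &&& 1)
            (PySem.List.pyGetD letters (num : Int) 0) : Nat) : Int) := rfl
        rw [this]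
        exact ih _ (num + 1) hdrop'
      · have hup : 65 ≤ ch.toNat ∧ ch.toNat ≤ 90 := by tauto
        rw [if_neg hlow, if_pos hup, if_pos hlet]
        simp only [if_pos (by omega : ch.toNat ≤ 90)] at hget ⊢
        rw [hmapget, hvnum]
        have ht : (pvChrA ((vals.getD num 0 : Nat) : Int)).toNat = vals.getD num 0 := by
          have := pvChrA_toNat ((vals.getD num 0 : Nat) : Int) (by omega) (by omega)
          omega
        rw [hvnum] at ht
        rw [ht]
        have : pvChrA (((encLetterB rule ((PySem.List.pyGetD letters ((num : Int) - 1) 0) &&& 1)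
            (PySem.List.pyGetD letters (num : Int) 0) : Nat) : Int) - 32)
            = pvChrB (((encLetterB rule ((PySem.List.pyGetD letters ((num : Int) - 1) 0) &&& 1)
            (PySem.List.pyGetD letters (num : Int) 0) : Nat) : Int) - 32) := rfl
        rw [this]
        exact ih _ (num + 1) hdrop'
    · have h1 : ¬ (97 ≤ ch.toNat ∧ ch.toNat ≤ 122) := by tauto
      have h2 : ¬ (65 ≤ ch.toNat ∧ ch.toNat ≤ 90) := by tauto
      rw [if_neg h1, if_neg h2, if_neg hlet]
      simp only [List.filterMap_cons, if_neg hlet] at hdrop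
      exact ih _ num hdrop

-- ===== VERDICT (by name: the statement is the Claim_ definition above) =====
theorem OneDEncrypt_spec : Claim_equal_OneDEncrypt := by
  intro plaintext key _hdom _hpre
  show OneDEncrypt plaintext key = OneDEncrypt_alt plaintext key
  unfold OneDEncrypt OneDEncrypt_alt
  dsimp only
  rw [pvBin_eq, lettersN_eq plaintext.toList]
  rw [show (plaintext.toList.foldl (fun (acc : List Char) c =>
      if 97 ≤ c.toNat ∧ c.toNat ≤ 122 then acc ++ [c]
      else if 65 ≤ c.toNat ∧ c.toNat ≤ 90 then acc ++ [pvChrA ((c.toNat : Int) + 32)]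
      else acc) []) = pvLettersA plaintext.toList from rfl]
  rw [streamA_eq]
  set rule := List.replicate (10 - (pvBinA key).length) '0' ++ (pvBinA key).drop 2 with hrule
  set codes := (pvLettersA plaintext.toList).map Char.toNat with hcodesdef
  have hflat : (pvLettersA plaintext.toList).flatMap (fun c => pvBits7B c.toNat)
      = codes.flatMap pvBits7B := by
    rw [hcodesdef, List.flatMap_map]
  rw [hflat]
  have hcodes : ∀ c ∈ codes, 97 ≤ c ∧ c ≤ 122 := by
    intro c hc
    rw [hcodesdef] at hc
    obtain ⟨x, hx, rfl⟩ := List.mem_map.1 hc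
    exact lettersA_range _ x hx
  have hb : ∀ b ∈ codes.flatMap pvBits7B, b ≤ 1 := by
    intro b hbm
    obtain ⟨c, -, hcb⟩ := List.mem_flatMap.1 hbm
    exact bits7_le_one _ b hcb
  have hlen7 : (codes.flatMap pvBits7B).length = 7 * codes.length := flatLen codes
  rw [chunks_eq rule _ hb codes.length hlen7]
  have hchunks : ((PySem.List.pyRange 0 (((codes.flatMap pvBits7B).length : Nat) : Int) 7).map
        (fun i => (PySem.List.slice (pvEncB rule (codes.flatMap pvBits7B))
          (some i) (some (i + 7))).foldl (fun v b => 2 * v + b) 0))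
      = (List.range codes.length).map (fun (j : Nat) => encLetterB rule
          ((PySem.List.pyGetD codes ((j : Int) - 1) 0) &&& 1) (codes.getD j 0)) := by
    rw [hlen7, pyRange7, List.map_map]
    apply List.map_congr_left
    intro k hk
    simp only [Function.comp_apply]
    rw [show ((7 * k : Nat) : Int) + 7 = ((7 * k + 7 : Nat) : Int) from by push_cast; ring]
    exact core rule codes hcodes k (List.mem_range.mp hk)
  rw [hchunks]
  set vals := (List.range codes.length).map (fun (j : Nat) => encLetterB rule
      ((PySem.List.pyGetD codes ((j : Int) - 1) 0) &&& 1) (codes.getD j 0)) with hvalsdef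
  have hvlen : vals.length = codes.length := by simp [hvalsdef]
  have hv128 : ∀ v ∈ vals, v < 128 := by
    intro v hv
    rw [hvalsdef] at hv
    obtain ⟨j, -, rfl⟩ := List.mem_map.1 hv
    exact encLetterB_lt _ _ _
  have hval : ∀ j, j < codes.length → vals.getD j 0
      = encLetterB rule ((PySem.List.pyGetD codes ((j : Int) - 1) 0) &&& 1)
          (PySem.List.pyGetD codes (j : Int) 0) := by
    intro j hj
    rw [PySem.List.pyGetD_natCast, hvalsdef,
        List.getD_eq_getElem _ _ (by simpa using hj), List.getElem_map, List.getElem_range]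
  have hinit : codes.drop 0 = plaintext.toList.filterMap (fun ch =>
      if (65 ≤ ch.toNat ∧ ch.toNat ≤ 90) ∨ (97 ≤ ch.toNat ∧ ch.toNat ≤ 122) then
        some (if ch.toNat ≤ 90 then ch.toNat + 32 else ch.toNat) else none) := by
    rw [List.drop_zero, lettersN_eq]
  have := rebuild_eq rule codes vals hvlen hv128 hval plaintext.toList [] 0 hinit
  rw [this]
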